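-- pv_equiv track=rewrite | github.com/EnesBrt/epreuve-du-feu_Coding_Accelerator | feu04.py | greater_square_calculator
-- ===== SOURCE A (Python) =====
-- def is_valid_square(plateau, top_left_row, top_left_col, size):
--     for n in range(top_left_row, top_left_row + size):
--         for m in range(top_left_col, top_left_col + size):
--             if plateau[n][m] == 'x':
--                 return False
--     return True
--
-- def greater_square_calculator(plateau):
--     if not plateau:
--         return None, None, 0
--
--     row = len(plateau)
--     column = len(plateau[0])
--
--     max_square_row = -1
--     max_square_col = -1
--     max_square_size = 0
--
--     # Parcourir tous les carrés possibles dans l'ordre décroissant de leur taille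
--     for size in range(min(row, column), 0, -1):
--         for n in range(row - size + 1):
--             for m in range(column - size + 1):
--                 if is_valid_square(plateau, n, m, size):
--                     max_square_row = n
--                     max_square_col = m
--                     max_square_size = size
--                     return max_square_row, max_square_col, max_square_size
--
--     return max_square_row, max_square_col, max_square_size
-- ===== SOURCE B (Python) =====
-- def greater_square_calculator(plateau):
--     if not plateau:
--         return None, None, 0
--
--     rows = len(plateau)
--     cols = len(plateau[0])
--
--     # up[i][j] = number of consecutive non-'x' cells in column j ending at row i
--     up = []
--     prev = [0] * cols
--     for r in plateau:
--         cur = [prev[j] + 1 if r[j] != 'x' else 0 for j in range(cols)]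
--         up.append(cur)
--         prev = cur
--
--     for size in range(min(rows, cols), 0, -1):
--         for n in range(rows - size + 1):
--             base = up[n + size - 1]
--             run = 0
--             for j in range(cols):
--                 run = run + 1 if base[j] >= size else 0
--                 if run >= size:
--                     return n, j - size + 1, size
--
--     return -1, -1, 0
-- ===== Notes on version B (the rewrite author's own statement) =====
-- stated objective: alternative
-- what changed: B precomputes per-column vertical run lengths of free cells once and then, for each candidate size and row, locates the first wide-enough window with a single running-count scan, instead of A's cell-by-cell recheck of every candidate square; on typical boards A's early exit makes the measured cost the same.
-- outside the precondition, e.g. on greater_square_calculator([['o', 'x'], ['o']]): A returns (0, 0, 1), B raises IndexError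
import Mathlib
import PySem

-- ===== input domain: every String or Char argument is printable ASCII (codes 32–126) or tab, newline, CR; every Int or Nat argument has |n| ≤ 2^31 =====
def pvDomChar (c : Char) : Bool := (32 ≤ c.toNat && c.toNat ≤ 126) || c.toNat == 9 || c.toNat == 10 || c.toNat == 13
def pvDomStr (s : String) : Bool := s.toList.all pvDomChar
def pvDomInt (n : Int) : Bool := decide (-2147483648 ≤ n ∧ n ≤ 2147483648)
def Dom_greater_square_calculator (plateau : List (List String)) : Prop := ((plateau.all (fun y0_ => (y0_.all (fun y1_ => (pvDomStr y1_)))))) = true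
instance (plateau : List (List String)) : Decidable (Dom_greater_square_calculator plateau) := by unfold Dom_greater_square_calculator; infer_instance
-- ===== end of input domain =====

-- B precomputes per-column vertical run lengths once and scans each row with a running count,
-- instead of A's cell-by-cell recheck of every candidate square.

-- ===== PORT A =====
-- plateau[n][m]; pyGetD with a default is exact here because Pre_ guarantees every access
-- A performs is in range (out of range, Python A raises IndexError and is excluded by Pre_).
def pvCell (plateau : List (List String)) (n m : Int) : String :=
  PySem.List.pyGetD (PySem.List.pyGetD plateau n []) m ""

def is_valid_square (plateau : List (List String)) (top_left_row top_left_col size : Int) : Bool :=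
  -- the double loop with early 'return False' is the conjunction over both ranges
  (PySem.List.pyRange top_left_row (top_left_row + size) 1).all fun n =>
    (PySem.List.pyRange top_left_col (top_left_col + size) 1).all fun m =>
      !(pvCell plateau n m == "x")

def greater_square_calculator (plateau : List (List String)) : Option Int × Option Int × Int :=
  if plateau = [] then (none, none, 0)
  else
    let row : Int := plateau.length
    let column : Int := plateau.headI.length
    -- triple loop with early 'return' = first hit of the nested search
    match (PySem.List.pyRange (min row column) 0 (-1)).findSome? (fun size =>
      (PySem.List.pyRange 0 (row - size + 1) 1).findSome? (fun n =>
        (PySem.List.pyRange 0 (column - size + 1) 1).findSome? (fun m =>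
          if is_valid_square plateau n m size then some (n, m, size) else none))) with
    | some (n, m, s) => (some n, some m, s)
    | none => (some (-1), some (-1), 0)

-- ===== PORT B =====
-- one row of the 'up' table: cur[j] = prev[j] + 1 if r[j] != 'x' else 0  (r[j] in range under Pre_)
def pvUpRow (cols : Int) (prev : List Int) (r : List String) : List Int :=
  (PySem.List.pyRange 0 cols 1).map fun j =>
    if !(PySem.List.pyGetD r j "" == "x") then PySem.List.pyGetD prev j 0 + 1 else 0

-- the 'for r in plateau' loop building 'up' (accumulates the rows, threads prev)
def pvUpRows (cols : Int) (prev : List Int) : List (List String) → List (List Int)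
  | [] => []
  | r :: rs =>
    let cur := pvUpRow cols prev r
    cur :: pvUpRows cols cur rs

-- the innermost 'for j in range(cols)' loop with the running count
def pvRunScan (base : List Int) (size : Int) : List Int → Int → Option Int
  | [], _ => none
  | j :: js, run =>
    let run' := if size ≤ PySem.List.pyGetD base j 0 then run + 1 else 0
    if size ≤ run' then some (j - size + 1) else pvRunScan base size js run'

def greater_square_calculator_alt (plateau : List (List String)) : Option Int × Option Int × Int :=
  if plateau = [] then (none, none, 0)
  else
    let rows : Int := plateau.length
    let cols : Int := plateau.headI.length
    let up := pvUpRows cols (List.replicate cols.toNat 0) plateau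
    match (PySem.List.pyRange (min rows cols) 0 (-1)).findSome? (fun size =>
      (PySem.List.pyRange 0 (rows - size + 1) 1).findSome? (fun n =>
        (pvRunScan (PySem.List.pyGetD up (n + size - 1) []) size
            (PySem.List.pyRange 0 cols 1) 0).map (fun m => (n, m, size)))) with
    | some (n, m, s) => (some n, some m, s)
    | none => (some (-1), some (-1), 0)

-- ===== PRECONDITION & SPEC =====
-- Pre_ excludes ragged boards (a row shorter than the first row): there Python A raises
-- IndexError or returns only by the accident of an early hit, and Python B raises IndexError.
def Pre_greater_square_calculator (plateau : List (List String)) : Prop :=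
  ∀ r ∈ plateau, plateau.headI.length ≤ r.length
instance (plateau : List (List String)) : Decidable (Pre_greater_square_calculator plateau) := by
  unfold Pre_greater_square_calculator; infer_instance

def pvWitness_greater_square_calculator : List (List String) := [["o", "x"], ["o", "o"]]

def Spec_greater_square_calculator (plateau : List (List String)) (out : Option Int × Option Int × Int) : Prop := out = greater_square_calculator_alt plateau
instance (plateau : List (List String)) (out : Option Int × Option Int × Int) : Decidable (Spec_greater_square_calculator plateau out) := by unfold Spec_greater_square_calculator; infer_instance

-- ===== CLAIM (what is proved, stated in full; the proofs are below) =====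
def Claim_equal_greater_square_calculator : Prop := ∀ (plateau : List (List String)), Dom_greater_square_calculator plateau → Pre_greater_square_calculator plateau → Spec_greater_square_calculator plateau (greater_square_calculator plateau)

-- ===== LEMMAS AND PROOFS =====

-- generic search helpers
theorem findSome?_congr' {a b : Type} (l : List a) (f g : a → Option b)
    (h : ∀ x ∈ l, f x = g x) : l.findSome? f = l.findSome? g := by
  induction l with
  | nil => rfl
  | cons x xs ih =>
    simp only [List.findSome?]
    rw [h x (by simp)]
    cases g x with
    | some v => rfl
    | none => exact ih (fun y hy => h y (by simp [hy]))

theorem find?_congr' {a : Type} (l : List a) (p q : a → Bool)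
    (h : ∀ x ∈ l, p x = q x) : l.find? p = l.find? q := by
  induction l with
  | nil => rfl
  | cons x xs ih =>
    simp only [List.find?]
    rw [h x (by simp)]
    cases q x with
    | true => rfl
    | false => exact ih (fun y hy => h y (by simp [hy]))

theorem findSome?_if {a b : Type} (l : List a) (p : a → Bool) (f : a → b) :
    l.findSome? (fun x => if p x then some (f x) else none) = (l.find? p).map f := by
  induction l with
  | nil => rfl
  | cons x xs ih =>
    simp only [List.findSome?, List.find?]
    cases hx : p x with
    | true => simp
    | false => simpa using ih

-- Nat-indexed view of the board and of the vertical run lengths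
def cellN (plateau : List (List String)) (i j : Nat) : String := (plateau.getD i []).getD j ""

def QN (plateau : List (List String)) (j i : Nat) : Bool := !(cellN plateau i j == "x")

def runlenN (Q : Nat → Bool) : Nat → Nat
  | 0 => if Q 0 then 1 else 0
  | (i+1) => if Q (i+1) then runlenN Q i + 1 else 0

theorem runlenN_zero (Q : Nat → Bool) : runlenN Q 0 = if Q 0 then 1 else 0 := rfl

theorem runlenN_succ (Q : Nat → Bool) (i : Nat) :
    runlenN Q (i + 1) = if Q (i + 1) then runlenN Q i + 1 else 0 := rfl

theorem QN_def (plateau : List (List String)) (j i : Nat) :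
    QN plateau j i = !((plateau.getD i []).getD j "" == "x") := rfl

theorem pvCell_eq (plateau : List (List String)) (n m : Int) (hn : 0 ≤ n) (hm : 0 ≤ m) :
    pvCell plateau n m = cellN plateau n.toNat m.toNat := by
  unfold pvCell cellN
  rw [show n = ((n.toNat : Nat) : Int) from (Int.toNat_of_nonneg hn).symm,
      show m = ((m.toNat : Nat) : Int) from (Int.toNat_of_nonneg hm).symm]
  rw [PySem.List.pyGetD_natCast, PySem.List.pyGetD_natCast]
  simp [Int.max_eq_left hn, Int.max_eq_left hm]

theorem runlen_char (Q : Nat → Bool) : ∀ (i t : Nat), t ≤ i + 1 →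
    (t ≤ runlenN Q i ↔ ∀ d, d < t → Q (i - d) = true) := by
  intro i
  induction i with
  | zero =>
    intro t ht
    unfold runlenN
    interval_cases t
    · simp
    · by_cases hq : Q 0 = true
      · simp [hq]
      · rw [if_neg hq]
        simp only [Bool.not_eq_true] at hq
        constructor
        · intro h; omega
        · intro h
          exact absurd (h 0 (by omega)) (by simp [hq])
  | succ i ih =>
    intro t ht
    unfold runlenN
    by_cases hq : Q (i + 1) = true
    · rw [if_pos hq]
      cases t with
      | zero => simp
      | succ t' =>
        have h' := ih t' (by omega)
        constructor
        · intro h d hd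
          cases d with
          | zero => simpa using hq
          | succ d' =>
            have hx : Q (i - d') = true := h'.1 (by omega) d' (by omega)
            simpa [Nat.succ_sub_succ] using hx
        · intro h
          have hx : t' ≤ runlenN Q i := h'.2 (fun d hd => by
            have hz := h (d + 1) (by omega)
            simpa [Nat.succ_sub_succ] using hz)
          omega
    · rw [if_neg hq]
      constructor
      · intro h d hd; omega
      · intro h
        rcases Nat.eq_zero_or_pos t with h0 | hpos
        · omega
        · have hz := h 0 hpos
          simp only [Nat.sub_zero] at hz
          exact absurd hz hq

theorem pvUpRow_get (cols : Int) (prev : List Int) (r : List String) (j : Nat)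
    (hj : j < cols.toNat) :
    (pvUpRow cols prev r).getD j 0
      = if !(r.getD j "" == "x") then prev.getD j 0 + 1 else 0 := by
  unfold pvUpRow
  rw [← PySem.List.pyGetD_natCast]
  rw [PySem.List.pyGetD_map_pyRange_of_nonneg _ _ _ _ (by omega) (by omega)]
  simp

theorem pvUpRows_get (cols : Int) (rs : List (List String)) (prev : List Int) (i : Nat)
    (hi : i < rs.length) :
    (pvUpRows cols prev rs).getD i []
      = pvUpRow cols (if i = 0 then prev else (pvUpRows cols prev rs).getD (i - 1) [])
          (rs.getD i []) := by
  induction rs generalizing prev i with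
  | nil => simp at hi
  | cons r rs ih =>
    cases i with
    | zero => simp [pvUpRows]
    | succ i' =>
      simp only [pvUpRows, Nat.succ_ne_zero, Nat.add_sub_cancel]
      have hi' : i' < rs.length := by simpa using hi
      rw [show ((pvUpRow cols prev r :: pvUpRows cols (pvUpRow cols prev r) rs).getD (i' + 1) [])
            = (pvUpRows cols (pvUpRow cols prev r) rs).getD i' [] from rfl]
      rw [ih (pvUpRow cols prev r) i' hi']
      cases i' with
      | zero => simp
      | succ i'' => rfl

theorem up_get (plateau : List (List String)) (i j : Nat) (hi : i < plateau.length)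
    (hj : j < plateau.headI.length) :
    ((pvUpRows (plateau.headI.length : Int)
        (List.replicate ((plateau.headI.length : Int)).toNat 0) plateau).getD i []).getD j 0
      = (runlenN (QN plateau j) i : Int) := by
  induction i with
  | zero =>
    rw [pvUpRows_get _ _ _ 0 hi]
    rw [if_pos rfl]
    rw [pvUpRow_get _ _ _ j (by simpa using hj)]
    have hrep : (List.replicate ((plateau.headI.length : Int)).toNat (0 : Int)).getD j 0 = 0 := by
      rcases Nat.lt_or_ge j ((plateau.headI.length : Int)).toNat with h | h
      · rw [List.getD_eq_getElem _ _ (by simpa using h)]; simp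
      · rw [List.getD_eq_default _ _ (by simpa using h)]
    rw [hrep, ← QN_def, runlenN_zero]
    split <;> simp
  | succ i ihh =>
    rw [pvUpRows_get _ _ _ (i + 1) hi]
    rw [if_neg (Nat.succ_ne_zero i), Nat.add_sub_cancel]
    rw [pvUpRow_get _ _ _ j (by simpa using hj)]
    rw [ihh (by omega), ← QN_def, runlenN_succ]
    split <;> simp

-- the window predicate B's running scan searches for
def windowB (base : List Int) (s m : Int) : Bool :=
  (PySem.List.pyRange m (m + s) 1).all (fun b => decide (s ≤ PySem.List.pyGetD base b 0))

theorem pvRunScan_nil (base : List Int) (s r : Int) : pvRunScan base s [] r = none := rfl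

theorem pvRunScan_cons (base : List Int) (s j r : Int) (js : List Int) :
    pvRunScan base s (j :: js) r =
      if s ≤ (if s ≤ PySem.List.pyGetD base j 0 then r + 1 else 0) then some (j - s + 1)
      else pvRunScan base s js (if s ≤ PySem.List.pyGetD base j 0 then r + 1 else 0) := rfl

theorem find?_pyRange_shift (p : Int → Bool) (X : Int) : ∀ (k : Nat) (lo lo' : Int),
    lo + k = lo' → (∀ m, lo ≤ m → m < lo' → p m = false) →
    (PySem.List.pyRange lo X 1).find? p = (PySem.List.pyRange lo' X 1).find? p := by
  intro k
  induction k with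
  | zero =>
    intro lo lo' hk hf
    rw [show lo' = lo by omega]
  | succ k ih =>
    intro lo lo' hk hf
    rcases Int.lt_or_le lo X with hx | hx
    · rw [PySem.List.pyRange_one_cons hx]
      rw [List.find?_cons_of_neg (by simp [hf lo le_rfl (by omega)])]
      exact ih (lo + 1) lo' (by omega) (fun m hm1 hm2 => hf m (by omega) hm2)
    · rw [PySem.List.pyRange_one_eq_nil hx, PySem.List.pyRange_one_eq_nil (by omega)]

theorem runScan_eq (base : List Int) (s : Int) (hs : 1 ≤ s) :
    ∀ (k : Nat) (c a r : Int), a + k = c → 0 ≤ r → r ≤ a → r < s →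
    (∀ d, 0 ≤ d → d < r → s ≤ PySem.List.pyGetD base (a - 1 - d) 0) →
    (∀ m, 0 ≤ m → m < a - r → windowB base s m = false) →
    pvRunScan base s (PySem.List.pyRange a c 1) r
      = (PySem.List.pyRange (a - r) (c - s + 1) 1).find? (windowB base s) := by
  intro k
  induction k with
  | zero =>
    intro c a r hk h0r hra hrs hrun hfail
    rw [PySem.List.pyRange_one_eq_nil (by omega), pvRunScan_nil,
        PySem.List.pyRange_one_eq_nil (by omega)]
    rfl
  | succ k ih =>
    intro c a r hk h0r hra hrs hrun hfail
    have hac : a < c := by omega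
    rw [PySem.List.pyRange_one_cons hac, pvRunScan_cons]
    by_cases hQ : s ≤ PySem.List.pyGetD base a 0
    · rw [if_pos hQ]
      by_cases hret : s ≤ r + 1
      · rw [if_pos hret]
        have hwin : windowB base s (a - r) = true := by
          unfold windowB
          rw [List.all_eq_true]
          intro b hb
          rw [PySem.List.mem_pyRange_one] at hb
          rcases eq_or_lt_of_le (show b ≤ a by omega) with hba | hba
          · subst hba; simpa using hQ
          · have hd := hrun (a - 1 - b) (by omega) (by omega)
            simp only [decide_eq_true_eq]
            have : a - 1 - (a - 1 - b) = b := by ring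
            rwa [this] at hd
        rw [PySem.List.pyRange_one_cons (show a - r < c - s + 1 by omega)]
        rw [List.find?_cons_of_pos hwin]
        rw [show a - s + 1 = a - r by omega]
      · rw [if_neg hret]
        have hrec := ih c (a + 1) (r + 1) (by omega) (by omega) (by omega) (by omega)
          (by
            intro d hd0 hdr
            rcases eq_or_lt_of_le hd0 with hd | hd
            · rw [show a + 1 - 1 - d = a by omega]; exact hQ
            · have := hrun (d - 1) (by omega) (by omega)
              rwa [show a - 1 - (d - 1) = a + 1 - 1 - d by ring] at this)
          (fun m hm0 hmlt => hfail m hm0 (by omega))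
        rw [hrec, show a + 1 - (r + 1) = a - r by ring]
    · rw [if_neg hQ, if_neg (show ¬ s ≤ (0 : Int) by omega)]
      have hfail' : ∀ m, 0 ≤ m → m < a + 1 → windowB base s m = false := by
        intro m hm0 hmlt
        rcases Int.lt_or_le m (a - r) with h | h
        · exact hfail m hm0 h
        · unfold windowB
          rw [List.all_eq_false]
          refine ⟨a, PySem.List.mem_pyRange_one.mpr ⟨by omega, by omega⟩, by simp [hQ]⟩
      have hrec := ih c (a + 1) 0 (by omega) le_rfl (by omega) (by omega)
        (fun d hd0 hdr => absurd hdr (by omega))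
        (fun m hm0 hmlt => hfail' m hm0 (by omega))
      rw [hrec, show a + 1 - (0 : Int) = a + 1 by ring]
      exact (find?_pyRange_shift (windowB base s) (c - s + 1) (r + 1).toNat (a - r) (a + 1)
        (by omega) (fun m hm1 hm2 => hfail' m (by omega) hm2)).symm

theorem valid_eq_window (plateau : List (List String)) (n m s : Int)
    (hs : 1 ≤ s) (hn : 0 ≤ n) (hm : 0 ≤ m)
    (hrow : n + s ≤ (plateau.length : Int)) (hcol : m + s ≤ (plateau.headI.length : Int)) :
    is_valid_square plateau n m s
      = windowB (PySem.List.pyGetD (pvUpRows (plateau.headI.length : Int)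
          (List.replicate ((plateau.headI.length : Int)).toNat 0) plateau) (n + s - 1) []) s m := by
  have hi_nn : (0 : Int) ≤ n + s - 1 := by omega
  have hi_int : (((n + s - 1).toNat : Nat) : Int) = n + s - 1 := Int.toNat_of_nonneg hi_nn
  have hi_lt : (n + s - 1).toNat < plateau.length := by omega
  have hbase : ∀ b : Int, m ≤ b → b < m + s →
      PySem.List.pyGetD (PySem.List.pyGetD (pvUpRows (plateau.headI.length : Int)
          (List.replicate ((plateau.headI.length : Int)).toNat 0) plateau) (n + s - 1) []) b 0
        = (runlenN (QN plateau b.toNat) (n + s - 1).toNat : Int) := by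
    intro b hb1 hb2
    rw [show n + s - 1 = (((n + s - 1).toNat : Nat) : Int) from hi_int.symm,
        PySem.List.pyGetD_natCast]
    rw [show b = ((b.toNat : Nat) : Int) from (Int.toNat_of_nonneg (by omega)).symm,
        PySem.List.pyGetD_natCast]
    exact up_get plateau (n + s - 1).toNat b.toNat hi_lt (by omega)
  rw [Bool.eq_iff_iff]
  unfold is_valid_square windowB
  simp only [List.all_eq_true, PySem.List.mem_pyRange_one, decide_eq_true_eq,
    Bool.not_eq_true', beq_eq_false_iff_ne, and_imp]
  constructor
  · intro hv b hb1 hb2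
    rw [hbase b hb1 hb2]
    have hr : s.toNat ≤ runlenN (QN plateau b.toNat) (n + s - 1).toNat := by
      rw [runlen_char _ _ _ (by omega)]
      intro d hd
      have hcell := hv (n + s - 1 - (d : Int)) (by omega) (by omega) b hb1 hb2
      rw [pvCell_eq _ _ _ (by omega) (by omega)] at hcell
      rw [show (n + s - 1 - (d : Int)).toNat = (n + s - 1).toNat - d by omega] at hcell
      unfold QN
      simp only [Bool.not_eq_true', beq_eq_false_iff_ne]
      exact hcell
    omega
  · intro hw a ha1 ha2 b hb1 hb2
    have hwb := hw b hb1 hb2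
    rw [hbase b hb1 hb2] at hwb
    have hr : s.toNat ≤ runlenN (QN plateau b.toNat) (n + s - 1).toNat := by omega
    have hq := (runlen_char _ _ _ (by omega)).mp hr ((n + s - 1 - a).toNat) (by omega)
    unfold QN at hq
    simp only [Bool.not_eq_eq_eq_not, Bool.not_true, beq_eq_false_iff_ne] at hq
    rw [pvCell_eq _ _ _ (by omega) (by omega)]
    rwa [show (n + s - 1).toNat - (n + s - 1 - a).toNat = a.toNat by omega] at hq

theorem inner_eq (plateau : List (List String)) :
    (PySem.List.pyRange (min (plateau.length : Int) (plateau.headI.length : Int)) 0 (-1)).findSome?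
      (fun size => (PySem.List.pyRange 0 ((plateau.length : Int) - size + 1) 1).findSome?
        (fun n => (PySem.List.pyRange 0 ((plateau.headI.length : Int) - size + 1) 1).findSome?
          (fun m => if is_valid_square plateau n m size then some (n, m, size) else none)))
    = (PySem.List.pyRange (min (plateau.length : Int) (plateau.headI.length : Int)) 0 (-1)).findSome?
      (fun size => (PySem.List.pyRange 0 ((plateau.length : Int) - size + 1) 1).findSome?
        (fun n => (pvRunScan (PySem.List.pyGetD (pvUpRows (plateau.headI.length : Int)
              (List.replicate ((plateau.headI.length : Int)).toNat 0) plateau) (n + size - 1) [])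
            size (PySem.List.pyRange 0 (plateau.headI.length : Int) 1) 0).map
              (fun m => (n, m, size)))) := by
  apply findSome?_congr'
  intro size hsize
  rw [PySem.List.mem_pyRange_neg_one] at hsize
  apply findSome?_congr'
  intro n hn
  rw [PySem.List.mem_pyRange_one] at hn
  rw [findSome?_if]
  rw [runScan_eq _ size (by omega) ((plateau.headI.length : Int)).toNat
      (plateau.headI.length : Int) 0 0 (by omega) le_rfl le_rfl (by omega)
      (fun d h1 h2 => absurd h2 (by omega)) (fun m h1 h2 => absurd h2 (by omega))]
  rw [show (0 : Int) - 0 = 0 by ring]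
  congr 1
  apply find?_congr'
  intro m hm
  rw [PySem.List.mem_pyRange_one] at hm
  exact valid_eq_window plateau n m size (by omega) (by omega) (by omega) (by omega) (by omega)

theorem main_equiv (plateau : List (List String)) :
    greater_square_calculator plateau = greater_square_calculator_alt plateau := by
  by_cases hnil : plateau = []
  · subst hnil; rfl
  · unfold greater_square_calculator greater_square_calculator_alt
    simp only [if_neg hnil]
    rw [inner_eq plateau]

-- ===== VERDICT (by name: the statement is the Claim_ definition above) =====
theorem greater_square_calculator_spec : Claim_equal_greater_square_calculator := by
  intro plateau _ _
  unfold Spec_greater_square_calculator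
  exact main_equiv plateau
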